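-- pv_equiv track=rewrite | github.com/AlexVulf/TrandsITplus | 1069 - Diamantes e Areia.py | count_diamonds
-- ===== SOURCE A (Python) =====
-- def count_diamonds(s):
--     stack, diamonds = 0, 0
--     for char in s:
--         if char == '<':
--             stack += 1
--         elif char == '>' and stack:
--             stack -= 1
--             diamonds += 1
--     return diamonds
-- ===== SOURCE B (Python) =====
-- def count_diamonds(s):
--     # matched pairs = (number of '>') - (unmatched '>'s),
--     # where unmatched '>'s = max over prefixes of (#'>' - #'<'), floored at 0.
--     excess = 0
--     worst = 0
--     for char in s:
--         excess += (char == '>') - (char == '<')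
--         if excess > worst:
--             worst = excess
--     return sum(char == '>' for char in s) - worst
-- ===== Notes on version B (the rewrite author's own statement) =====
-- stated objective: alternative
-- what changed: Replaces the stack-counter pair-cancelling pass by a closed-form characterisation: answer = total count of '>' minus the maximum prefix excess of '>' over '<' (the unmatched '>'s), computed as a running walk with its max.
import Mathlib
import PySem

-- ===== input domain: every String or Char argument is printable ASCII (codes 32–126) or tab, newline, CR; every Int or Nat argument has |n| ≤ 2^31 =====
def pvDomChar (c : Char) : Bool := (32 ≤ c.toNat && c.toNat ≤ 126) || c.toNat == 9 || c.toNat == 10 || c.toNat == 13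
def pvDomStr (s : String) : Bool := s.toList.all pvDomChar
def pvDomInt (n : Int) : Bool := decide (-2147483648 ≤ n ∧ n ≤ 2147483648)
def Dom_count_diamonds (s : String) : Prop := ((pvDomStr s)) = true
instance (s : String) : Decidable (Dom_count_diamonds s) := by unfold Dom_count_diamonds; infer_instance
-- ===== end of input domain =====

-- B replaces A's stack-counter cancelling pass by a closed form: total '>' minus the
-- maximum prefix excess of '>' over '<' (the unmatched '>'s); same cost, alternative algorithm.

-- ===== PORT A =====
-- one step of A's loop body: state (stack, diamonds)
def pvStepA (p : Int × Int) (char : Char) : Int × Int :=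
  if char = '<' then (p.1 + 1, p.2)
  else if char = '>' ∧ p.1 ≠ 0 then (p.1 - 1, p.2 + 1)
  else p

def count_diamonds (s : String) : Int :=
  (s.toList.foldl pvStepA (0, 0)).2

-- ===== PORT B =====
-- one step of B's loop body: state (excess, worst)
def pvStepB (p : Int × Int) (char : Char) : Int × Int :=
  let excess := p.1 + ((if char = '>' then (1 : Int) else 0) - (if char = '<' then (1 : Int) else 0))
  (excess, if excess > p.2 then excess else p.2)

def count_diamonds_alt (s : String) : Int :=
  (s.toList.map (fun char => if char = '>' then (1 : Int) else 0)).sum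
    - (s.toList.foldl pvStepB (0, 0)).2

-- ===== PRECONDITION & SPEC =====
def Spec_count_diamonds (s : String) (out : Int) : Prop := out = count_diamonds_alt s
instance (s : String) (out : Int) : Decidable (Spec_count_diamonds s out) := by unfold Spec_count_diamonds; infer_instance

-- ===== CLAIM (what is proved, stated in full; the proofs are below) =====
def Claim_equal_count_diamonds : Prop := ∀ (s : String), Dom_count_diamonds s → Spec_count_diamonds s (count_diamonds s)

-- ===== LEMMAS AND PROOFS =====

-- loop invariant: A's stack is worst - excess, and A's final diamond count is
-- d + (#'>' in the rest) + worst - (final worst of B's walk)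
theorem pv_key (l : List Char) : ∀ (exc worst d : Int), exc ≤ worst →
    (List.foldl pvStepA (worst - exc, d) l).2 =
      d + (List.map (fun c => if c = '>' then (1 : Int) else 0) l).sum + worst
        - (List.foldl pvStepB (exc, worst) l).2 := by
  induction l with
  | nil => intro exc worst d h; simp
  | cons c t ih =>
    intro exc worst d h
    simp only [List.foldl_cons, List.map_cons, List.sum_cons, pvStepA, pvStepB]
    by_cases h1 : c = '<'
    · -- '<': A pushes; B's walk steps down, its max is unchanged
      subst h1
      simp only [reduceIte, Char.reduceEq]
      rw [show exc + (0 - 1) = exc - 1 by ring]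
      rw [if_neg (show ¬ exc - 1 > worst by omega)]
      rw [show worst - exc + 1 = worst - (exc - 1) by ring]
      rw [ih (exc - 1) worst d (by omega)]
      ring
    · by_cases h2 : c = '>'
      · subst h2
        simp only [reduceIte, Char.reduceEq]
        rw [show exc + (1 - 0) = exc + 1 by ring]
        by_cases h3 : worst - exc = 0
        · -- stack 0: A skips the '>'; B's max increases by 1
          rw [if_neg (by simp [h3])]
          rw [if_pos (show exc + 1 > worst by omega)]
          rw [show (worst - exc : Int) = (exc + 1) - (exc + 1) by omega]
          rw [ih (exc + 1) (exc + 1) d le_rfl]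
          have hw : worst = exc := by omega
          rw [hw]
          ring
        · -- stack positive: A matches a pair; B's max is unchanged
          rw [if_pos (show True ∧ (worst - exc : Int) ≠ 0 from ⟨trivial, h3⟩)]
          rw [if_neg (show ¬ exc + 1 > worst by omega)]
          rw [show worst - exc - 1 = worst - (exc + 1) by ring]
          rw [ih (exc + 1) worst (d + 1) (by omega)]
          ring
      · -- any other character: both states unchanged
        simp only [if_neg h1, if_neg h2, if_neg (by simp [h2] :
            ¬ (c = '>' ∧ (worst - exc : Int) ≠ 0))]
        rw [show exc + ((0:Int) - 0) = exc by ring]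
        rw [if_neg (show ¬ exc > worst by omega)]
        rw [ih exc worst d h]
        ring

-- ===== VERDICT (by name: the statement is the Claim_ definition above) =====
theorem count_diamonds_spec : Claim_equal_count_diamonds := by
  intro s _
  unfold Spec_count_diamonds count_diamonds count_diamonds_alt
  have h := pv_key s.toList 0 0 0 le_rfl
  simp only [sub_zero] at h
  rw [h]; ring
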